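-- pv_equiv track=rewrite | github.com/Ethara-Ai/pzprjs | games/kshitiz/play_paritypipes.py | _decode_parity
-- ===== SOURCE A (Python) =====
-- def _decode_parity(url_body, rows, cols):
--     num_crosses = (rows + 1) * (cols + 1)
--     colors = []
--     for ch in url_body:
--         val = int(ch, 32)
--         for bit in range(4, -1, -1):
--             if len(colors) >= num_crosses:
--                 break
--             b = (val >> bit) & 1
--             colors.append(1 if b == 1 else 2)
--     grid = []
--     idx = 0
--     for r in range(rows + 1):
--         row = []
--         for c in range(cols + 1):
--             row.append(colors[idx] if idx < len(colors) else 2)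
--             idx += 1
--         grid.append(row)
--     return grid
-- ===== SOURCE B (Python) =====
-- def _decode_parity(url_body, rows, cols):
--     # Single decode-and-place pass: pre-fill the grid with the default color 2,
--     # then walk a (row, col) cursor over it while decoding each base-32 character,
--     # writing one color per bit; no intermediate flat color list, no reshape pass.
--     grid = [[2] * (cols + 1) for _ in range(rows + 1)]
--     r = c = 0
--     for ch in url_body:
--         val = int(ch, 32)
--         for mask in (16, 8, 4, 2, 1):
--             if r <= rows and c <= cols:
--                 grid[r][c] = 1 if val & mask else 2
--                 c += 1
--                 if c > cols:
--                     r += 1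
--                     c = 0
--     return grid
-- ===== Notes on version B (the rewrite author's own statement) =====
-- stated objective: alternative
-- what changed: B replaces A's two passes (build a guarded flat color list, then reshape it into rows with an index counter) by one decode-and-place pass: the grid is pre-filled with the default color 2 and a running (row,col) cursor writes each decoded bit directly into place, still validating every character via int(ch,32).
import Mathlib
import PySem

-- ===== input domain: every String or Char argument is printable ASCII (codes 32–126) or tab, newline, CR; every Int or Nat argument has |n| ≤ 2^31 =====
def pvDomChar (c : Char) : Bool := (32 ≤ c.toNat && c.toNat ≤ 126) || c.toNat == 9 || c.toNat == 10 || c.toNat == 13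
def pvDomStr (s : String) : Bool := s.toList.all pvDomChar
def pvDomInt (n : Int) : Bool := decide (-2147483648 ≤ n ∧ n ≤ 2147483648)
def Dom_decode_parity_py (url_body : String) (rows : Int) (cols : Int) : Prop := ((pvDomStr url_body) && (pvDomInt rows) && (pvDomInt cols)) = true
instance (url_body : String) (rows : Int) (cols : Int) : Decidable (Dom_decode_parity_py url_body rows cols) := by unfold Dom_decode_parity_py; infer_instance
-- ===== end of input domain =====

-- B fuses A's two passes (build a guarded flat color list, then reshape it) into one
-- decode-and-place pass over a pre-filled grid with a running (row, col) cursor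
-- (alternative decomposition, same asymptotic cost).


-- shared port of the builtin int(ch, 32); Pre_ guarantees it succeeds, so .getD 0 is never the default
def pvInt32 (ch : Char) : Int := (PySem.Int.ofCharsBase? [ch] 32).getD 0

-- port of A's expression '1 if ((val >> bit) & 1) == 1 else 2' (bit ∈ 4..0, so bit.toNat is exact)
def pvBitVal (val : Int) (bit : Int) : Int :=
  if PySem.Int.band (val >>> bit.toNat) 1 = 1 then 1 else 2

-- port of B's expression '1 if val & mask else 2' (Python int truthiness: nonzero)
def pvMaskVal (val : Int) (mask : Int) : Int :=
  if PySem.Int.band val mask ≠ 0 then 1 else 2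

-- ===== PORT A =====
-- A's inner 'break' is ported as a skip-guard: the break condition (len(colors) >= num_crosses)
-- is monotone (the list only grows), so skipping the remaining bits equals breaking out.
-- colors[idx] is read with idx.toNat: idx starts at 0 and is only incremented, so never negative.
def decode_parity_py (url_body : String) (rows : Int) (cols : Int) : List (List Int) :=
  let num_crosses : Int := (rows + 1) * (cols + 1)
  let colors : List Int := url_body.toList.foldl (fun colors ch =>
    let val : Int := pvInt32 ch
    (PySem.List.pyRange 4 (-1) (-1)).foldl (fun colors bit =>
      if (colors.length : Int) ≥ num_crosses then colors
      else colors ++ [pvBitVal val bit]) colors) []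
  let st := (PySem.List.pyRange 0 (rows + 1) 1).foldl
    (fun (st : List (List Int) × Int) _r =>
      let row_st := (PySem.List.pyRange 0 (cols + 1) 1).foldl
        (fun (q : List Int × Int) _c =>
          (q.1 ++ [if q.2 < (colors.length : Int) then colors.getD q.2.toNat 0 else 2], q.2 + 1))
        ([], st.2)
      (st.1 ++ [row_st.1], row_st.2)) ([], 0)
  st.1

-- ===== PORT B =====
-- grid[r][c] = v with the cursor r, c: both start at 0 and are only incremented / reset to 0,
-- so r.toNat / c.toNat are exact.
def decode_parity_py_alt (url_body : String) (rows : Int) (cols : Int) : List (List Int) :=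
  let grid0 : List (List Int) := List.replicate (rows + 1).toNat (List.replicate (cols + 1).toNat 2)
  let st := url_body.toList.foldl (fun (st : List (List Int) × Int × Int) ch =>
    let val : Int := pvInt32 ch
    ([(16 : Int), 8, 4, 2, 1]).foldl (fun (st : List (List Int) × Int × Int) mask =>
      let (g, r, c) := st
      if r ≤ rows ∧ c ≤ cols then
        let g := g.modify r.toNat (fun row => row.set c.toNat (pvMaskVal val mask))
        let c := c + 1
        if c > cols then (g, r + 1, 0) else (g, r, c)
      else st) st) (grid0, 0, 0)
  st.1

-- ===== PRECONDITION & SPEC =====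
-- Pre_: exactly the inputs on which every int(ch, 32) call succeeds — on any other input both
-- A and B raise ValueError at the first bad character. (The recorded bound 0 ≤ v < 32 holds
-- automatically for any single base-32 digit, so it excludes nothing beyond the ValueError inputs.)
def Pre_decode_parity_py (url_body : String) (rows : Int) (cols : Int) : Prop :=
  (url_body.toList.all (fun ch => (PySem.Int.ofCharsBase? [ch] 32).any (fun v => decide (0 ≤ v ∧ v < 32)))) = true
instance (url_body : String) (rows : Int) (cols : Int) : Decidable (Pre_decode_parity_py url_body rows cols) := by unfold Pre_decode_parity_py; infer_instance

def pvWitness_decode_parity_py : String × Int × Int := ("7b", 1, 2)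

def Spec_decode_parity_py (url_body : String) (rows : Int) (cols : Int) (out : List (List Int)) : Prop := out = decode_parity_py_alt url_body rows cols
instance (url_body : String) (rows : Int) (cols : Int) (out : List (List Int)) : Decidable (Spec_decode_parity_py url_body rows cols out) := by unfold Spec_decode_parity_py; infer_instance

-- ===== CLAIM (what is proved, stated in full; the proofs are below) =====
def Claim_equal_decode_parity_py : Prop := ∀ (url_body : String) (rows : Int) (cols : Int), Dom_decode_parity_py url_body rows cols → Pre_decode_parity_py url_body rows cols → Spec_decode_parity_py url_body rows cols (decode_parity_py url_body rows cols)

-- ===== LEMMAS AND PROOFS =====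

theorem decode_parity_py_witness_ok :
    Dom_decode_parity_py pvWitness_decode_parity_py.1 pvWitness_decode_parity_py.2.1 pvWitness_decode_parity_py.2.2 ∧
    Pre_decode_parity_py pvWitness_decode_parity_py.1 pvWitness_decode_parity_py.2.1 pvWitness_decode_parity_py.2.2 := by
  decide

-- the per-character 5-color chunk, in A's form (high bit to low bit)
def pvBits (v : Int) : List Int := [4, 3, 2, 1, 0].map (pvBitVal v)

-- the whole decoded color stream
def pvStream (u : String) : List Int := u.toList.flatMap (fun ch => pvBits (pvInt32 ch))

-- the common target: grid cell (r, c) holds ws.getD (r*W + c) 2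
def pvMkGrid (R W : Nat) (ws : List Int) : List (List Int) :=
  (List.range R).map (fun r => (List.range W).map (fun c => ws.getD (r * W + c) 2))

-- A's guarded append step
def pvPushG (num : Int) (acc : List Int) (v : Int) : List Int :=
  if (acc.length : Int) ≥ num then acc else acc ++ [v]

-- B's place-and-advance step
def pvStepB (rows cols : Int) (st : List (List Int) × Int × Int) (v : Int) : List (List Int) × Int × Int :=
  if st.2.1 ≤ rows ∧ st.2.2 ≤ cols then
    let g := st.1.modify st.2.1.toNat (fun row => row.set st.2.2.toNat v)
    if st.2.2 + 1 > cols then (g, st.2.1 + 1, 0) else (g, st.2.1, st.2.2 + 1)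
  else st

theorem pv_foldl_foldl_flatMap {α β σ : Type} (l : List α) (g : α → List β) (f : σ → β → σ) (init : σ) :
    l.foldl (fun a x => (g x).foldl f a) init = (l.flatMap g).foldl f init := by
  induction l generalizing init with
  | nil => rfl
  | cons x xs ih => simp [List.flatMap_cons, List.foldl_append, ih]

theorem pv_pushG_eq_take (num : Int) (vs : List Int) (acc : List Int) :
    vs.foldl (pvPushG num) acc = acc ++ vs.take (num.toNat - acc.length) := by
  induction vs generalizing acc with
  | nil => simp
  | cons v vs ih =>
    simp only [List.foldl_cons, pvPushG]
    by_cases h : (acc.length : Int) ≥ num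
    · rw [if_pos h, ih]
      have : num.toNat - acc.length = 0 := by omega
      simp [this]
    · rw [if_neg h, ih]
      have h1 : num.toNat - acc.length = (num.toNat - (acc.length + 1)) + 1 := by omega
      rw [h1]
      simp [List.take_succ_cons]

theorem pv_getD_guard (C : List Int) (k : Nat) :
    (if (k : Int) < (C.length : Int) then C.getD k 0 else 2) = C.getD k 2 := by
  by_cases hk : k < C.length
  · rw [if_pos (by exact_mod_cast hk), List.getD_eq_getElem _ _ hk, List.getD_eq_getElem _ _ hk]
  · rw [if_neg (by omega), List.getD_eq_default _ _ (by omega)]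

theorem pv_inner (C : List Int) (m : Nat) (row : List Int) (n : Nat) :
    (List.range m).foldl (fun (q : List Int × Int) _ =>
        (q.1 ++ [if q.2 < (C.length : Int) then C.getD q.2.toNat 0 else 2], q.2 + 1)) (row, (n : Int))
      = (row ++ (List.range m).map (fun j => C.getD (n + j) 2), ((n + m : Nat) : Int)) := by
  induction m with
  | zero => simp
  | succ m ih =>
    rw [List.range_succ, List.foldl_append, ih, List.foldl_cons, List.foldl_nil]
    have h1 : ((n + m : Nat) : Int).toNat = n + m := by omega
    rw [List.map_append]
    simp only [h1, pv_getD_guard, List.map_cons, List.map_nil]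
    simp only [Prod.mk.injEq, List.append_assoc]
    exact ⟨trivial, by push_cast; ring⟩

theorem pv_outer (C : List Int) (W : Nat) (RR : Nat) (grid : List (List Int)) (n : Nat) :
    (List.range RR).foldl (fun (st : List (List Int) × Int) _ =>
        (st.1 ++ [((List.range W).foldl (fun (q : List Int × Int) _ =>
            (q.1 ++ [if q.2 < (C.length : Int) then C.getD q.2.toNat 0 else 2], q.2 + 1)) ([], st.2)).1],
         ((List.range W).foldl (fun (q : List Int × Int) _ =>
            (q.1 ++ [if q.2 < (C.length : Int) then C.getD q.2.toNat 0 else 2], q.2 + 1)) ([], st.2)).2))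
      (grid, (n : Int))
      = (grid ++ (List.range RR).map (fun i => (List.range W).map (fun j => C.getD (n + i * W + j) 2)),
         ((n + RR * W : Nat) : Int)) := by
  induction RR generalizing grid n with
  | zero => simp
  | succ m ih =>
    rw [List.range_succ, List.foldl_append, ih, List.foldl_cons, List.foldl_nil]
    rw [pv_inner C W [] (n + m * W)]
    rw [List.map_append]
    simp only [List.map_cons, List.map_nil, List.nil_append]
    simp only [Prod.mk.injEq, List.append_assoc]
    exact ⟨trivial, by congr 1; ring⟩

theorem pv_getD_concat (ws : List Int) (v : Int) (i : Nat) :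
    (ws ++ [v]).getD i 2 = if i = ws.length then v else ws.getD i 2 := by
  rcases lt_trichotomy i ws.length with h | h | h
  · rw [if_neg (by omega)]
    simp [List.getD_eq_getElem?_getD, List.getElem?_append_left h]
  · subst h
    simp [List.getD_eq_getElem?_getD]
  · rw [if_neg (by omega)]
    have h1 : (ws ++ [v]).length ≤ i := by simp; omega
    simp [List.getD_eq_getElem?_getD, List.getElem?_eq_none h1, List.getElem?_eq_none (by omega : ws.length ≤ i)]

theorem pv_flat_lt (R W r c : Nat) (hr : r < R) (hc : c < W) : r * W + c < R * W := by
  calc r * W + c < (r + 1) * W := by nlinarith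
    _ ≤ R * W := Nat.mul_le_mul_right W hr

theorem pv_flat_inj (W r c r' c' : Nat) (hc : c < W) (hc' : c' < W)
    (h : r * W + c = r' * W + c') : r = r' ∧ c = c' := by
  have hW : 0 < W := by omega
  have d1 : (r * W + c) / W = r := by
    rw [Nat.add_comm, Nat.add_mul_div_right _ _ hW, Nat.div_eq_of_lt hc]; omega
  have d2 : (r' * W + c') / W = r' := by
    rw [Nat.add_comm, Nat.add_mul_div_right _ _ hW, Nat.div_eq_of_lt hc']; omega
  have m1 : (r * W + c) % W = c := by
    rw [Nat.add_comm, Nat.add_mul_mod_self_right, Nat.mod_eq_of_lt hc]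
  have m2 : (r' * W + c') % W = c' := by
    rw [Nat.add_comm, Nat.add_mul_mod_self_right, Nat.mod_eq_of_lt hc']
  constructor
  · rw [← d1, ← d2, h]
  · rw [← m1, ← m2, h]

theorem pv_write (R W : Nat) (ws : List Int) (v : Int) (r c : Nat)
    (hr : r < R) (hc : c < W) (hk : ws.length = r * W + c) :
    (pvMkGrid R W ws).modify r (fun row => row.set c v) = pvMkGrid R W (ws ++ [v]) := by
  apply List.ext_getElem
  · simp [pvMkGrid]
  · intro r' h1 h2
    have hr' : r' < R := by simpa [pvMkGrid] using h2
    simp only [pvMkGrid, List.getElem_modify, List.getElem_map, List.getElem_range]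
    by_cases hrr : r = r'
    · subst hrr
      rw [if_pos rfl]
      apply List.ext_getElem
      · simp
      · intro c' hh1 hh2
        have hc' : c' < W := by simpa using hh2
        simp only [List.getElem_set, List.getElem_map, List.getElem_range]
        by_cases hcc : c = c'
        · subst hcc
          rw [if_pos rfl, pv_getD_concat, if_pos hk.symm]
        · rw [if_neg hcc, pv_getD_concat, if_neg (by
            intro hbad
            exact hcc (pv_flat_inj W r c r c' hc hc' (by omega)).2)]
    · rw [if_neg hrr]
      apply List.map_congr_left
      intro c' hcmem
      have hc' : c' < W := List.mem_range.mp hcmem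
      rw [pv_getD_concat, if_neg (by
        intro hbad
        exact hrr (pv_flat_inj W r c r' c' hc hc' (by omega)).1)]

theorem pv_B_fixed (rows cols : Int) (vs : List Int) (g : List (List Int)) (r c : Int)
    (h : ¬ (r ≤ rows ∧ c ≤ cols)) :
    vs.foldl (pvStepB rows cols) (g, r, c) = (g, r, c) := by
  induction vs with
  | nil => rfl
  | cons v vs ih => simp only [List.foldl_cons, pvStepB, if_neg h]; exact ih

theorem pv_grid0 (R W : Nat) :
    List.replicate R (List.replicate W (2 : Int)) = pvMkGrid R W [] := by
  apply List.ext_getElem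
  · simp [pvMkGrid]
  · intro i h1 h2
    simp [pvMkGrid, List.getElem_replicate]

theorem pv_B_main (rows cols : Int) (hrows : 0 ≤ rows) (hcols : 0 ≤ cols)
    (vs : List Int) (ws : List Int) (r c : Nat)
    (hc : c < (cols + 1).toNat) (hk : ws.length = r * (cols + 1).toNat + c)
    (hr : r < (rows + 1).toNat ∨ (r = (rows + 1).toNat ∧ c = 0)) :
    (vs.foldl (pvStepB rows cols) (pvMkGrid (rows + 1).toNat (cols + 1).toNat ws, (r : Int), (c : Int))).1
      = pvMkGrid (rows + 1).toNat (cols + 1).toNat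
          (ws ++ vs.take ((rows + 1).toNat * (cols + 1).toNat - ws.length)) := by
  set R := (rows + 1).toNat with hRdef
  set W := (cols + 1).toNat with hWdef
  have hR : (R : Int) = rows + 1 := by omega
  have hW : (W : Int) = cols + 1 := by omega
  induction vs generalizing ws r c with
  | nil => simp
  | cons v vs ih =>
    rcases hr with hrlt | ⟨hre, hce⟩
    · -- inside the grid: write and advance
      have hguard : ((r : Int) ≤ rows ∧ (c : Int) ≤ cols) := by
        constructor <;> omega
      rw [List.foldl_cons]
      rw [show pvStepB rows cols (pvMkGrid R W ws, (r : Int), (c : Int)) v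
            = if (c : Int) + 1 > cols
              then ((pvMkGrid R W ws).modify r (fun row => row.set c v), ((r : Int)) + 1, 0)
              else ((pvMkGrid R W ws).modify r (fun row => row.set c v), (r : Int), (c : Int) + 1) from by
        simp only [pvStepB, if_pos hguard]
        simp]
      have hwrite := pv_write R W ws v r c hrlt hc hk
      have hlen : ws.length < R * W := hk ▸ pv_flat_lt R W r c hrlt hc
      have htake : R * W - ws.length = (R * W - (ws.length + 1)) + 1 := by omega
      have hlen1 : (ws ++ [v]).length = ws.length + 1 := by simp
      by_cases hlast : (c : Int) + 1 > cols
      · have hcW : c + 1 = W := by omega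
        have hmul : (r + 1) * W = r * W + W := by ring
        have hk1 : (ws ++ [v]).length = (r + 1) * W + 0 := by omega
        rw [if_pos hlast, hwrite]
        rw [show ((r : Int) + 1) = ((r + 1 : Nat) : Int) from by push_cast; ring,
            show (0 : Int) = ((0 : Nat) : Int) from rfl]
        have hc1 : 0 < W := by omega
        have hr1 : r + 1 < R ∨ (r + 1 = R ∧ 0 = 0) := by omega
        rw [ih (ws ++ [v]) (r + 1) 0 hr1 hc1 hk1]
        rw [htake]
        simp [List.take_succ_cons, List.append_assoc]
      · have hcW : c + 1 < W := by omega
        have hk1 : (ws ++ [v]).length = r * W + (c + 1) := by omega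
        rw [if_neg hlast, hwrite]
        rw [show ((c : Int) + 1) = ((c + 1 : Nat) : Int) from by push_cast; ring]
        have hc1 : c + 1 < W := hcW
        have hr1 : r < R ∨ (r = R ∧ c + 1 = 0) := Or.inl hrlt
        rw [ih (ws ++ [v]) r (c + 1) hr1 hc1 hk1]
        rw [htake]
        simp [List.take_succ_cons, List.append_assoc]
    · -- cursor has left the grid: nothing more is written
      have hguard : ¬ ((r : Int) ≤ rows ∧ (c : Int) ≤ cols) := by
        intro ⟨h1, _⟩
        omega
      rw [pv_B_fixed rows cols _ _ _ _ hguard]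
      have h0 : R * W - ws.length = 0 := by
        subst hre hce
        omega
      rw [h0]
      simp

theorem pv_masks_eq_bits (v : Int) (h0 : 0 ≤ v) (h32 : v < 32) :
    ([(16 : Int), 8, 4, 2, 1]).map (pvMaskVal v) = pvBits v := by
  have key : ∀ m : Fin 32,
      ([(16 : Int), 8, 4, 2, 1]).map (pvMaskVal (m : Int)) = pvBits (m : Int) := by
    decide
  have hv : v = ((⟨v.toNat, by omega⟩ : Fin 32) : Int) := by simp; omega
  rw [hv]; exact key _

theorem pv_val_bound (u : String) (rows cols : Int) (hpre : Pre_decode_parity_py u rows cols) :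
    ∀ ch ∈ u.toList, 0 ≤ pvInt32 ch ∧ pvInt32 ch < 32 := by
  intro ch hch
  have h := List.all_eq_true.mp hpre ch hch
  unfold pvInt32
  cases hv : PySem.Int.ofCharsBase? [ch] 32 with
  | none =>
    rw [hv] at h
    simp [Option.any] at h
  | some v =>
    rw [hv] at h
    simp [Option.any] at h
    simpa using h

theorem pv_A_eq (u : String) (rows cols : Int) :
    decode_parity_py u rows cols
      = pvMkGrid (rows + 1).toNat (cols + 1).toNat
          ((pvStream u).take ((rows + 1) * (cols + 1)).toNat) := by
  have hr45 : PySem.List.pyRange 4 (-1) (-1) = [4, 3, 2, 1, 0] := by decide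
  have hrange : ∀ n : Int, PySem.List.pyRange 0 n 1 = (List.range n.toNat).map (fun k : Nat => (k : Int)) := by
    intro n; rw [PySem.List.pyRange_one]; simp
  simp only [decode_parity_py, hr45, hrange, List.foldl_map]
  set num := (rows + 1) * (cols + 1) with hnum
  have hchar : ∀ (ch : Char) (acc : List Int),
      ([(4:Int), 3, 2, 1, 0]).foldl (fun colors bit =>
        if (colors.length : Int) ≥ num then colors
        else colors ++ [pvBitVal (pvInt32 ch) bit]) acc
      = (pvBits (pvInt32 ch)).foldl (pvPushG num) acc := by
    intro ch acc
    rw [pvBits, List.foldl_map]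
    simp only [pvPushG]
  have hcolors : u.toList.foldl (fun colors ch =>
      ([(4:Int), 3, 2, 1, 0]).foldl (fun colors bit =>
        if (colors.length : Int) ≥ num then colors
        else colors ++ [pvBitVal (pvInt32 ch) bit]) colors) []
      = (pvStream u).take num.toNat := by
    calc _ = u.toList.foldl (fun acc ch => (pvBits (pvInt32 ch)).foldl (pvPushG num) acc) [] := by
            apply PySem.List.foldl_congr_mem
            intro acc ch _
            exact hchar ch acc
      _ = (pvStream u).foldl (pvPushG num) [] := pv_foldl_foldl_flatMap _ _ _ _
      _ = (pvStream u).take num.toNat := by rw [pv_pushG_eq_take]; simp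
  rw [hcolors]
  set C := (pvStream u).take num.toNat with hC
  have h0 : ((0 : Nat) : Int) = 0 := rfl
  have houter := pv_outer C (cols + 1).toNat (rows + 1).toNat [] 0
  rw [h0] at houter
  rw [houter]
  simp [pvMkGrid]

theorem pv_B_eq (u : String) (rows cols : Int) (hpre : Pre_decode_parity_py u rows cols) :
    decode_parity_py_alt u rows cols
      = pvMkGrid (rows + 1).toNat (cols + 1).toNat
          ((pvStream u).take ((rows + 1) * (cols + 1)).toNat) := by
  simp only [decode_parity_py_alt]
  have hbody : ∀ (val : Int) (st : List (List Int) × Int × Int),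
      ([(16 : Int), 8, 4, 2, 1]).foldl (fun (st : List (List Int) × Int × Int) mask =>
        let (g, r, c) := st
        if r ≤ rows ∧ c ≤ cols then
          let g := g.modify r.toNat (fun row => row.set c.toNat (pvMaskVal val mask))
          let c := c + 1
          if c > cols then (g, r + 1, 0) else (g, r, c)
        else st) st
      = (([(16 : Int), 8, 4, 2, 1]).map (pvMaskVal val)).foldl (pvStepB rows cols) st := by
    intro val st
    rw [List.foldl_map]
    apply PySem.List.foldl_congr_mem
    intro acc mask _
    rcases acc with ⟨g, r, c⟩
    rfl
  have hflat : u.toList.foldl (fun st ch =>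
        ([(16 : Int), 8, 4, 2, 1]).foldl (fun (st : List (List Int) × Int × Int) mask =>
          let (g, r, c) := st
          if r ≤ rows ∧ c ≤ cols then
            let g := g.modify r.toNat (fun row => row.set c.toNat (pvMaskVal (pvInt32 ch) mask))
            let c := c + 1
            if c > cols then (g, r + 1, 0) else (g, r, c)
          else st) st)
      (List.replicate (rows + 1).toNat (List.replicate (cols + 1).toNat (2 : Int)), 0, 0)
      = (pvStream u).foldl (pvStepB rows cols)
          (List.replicate (rows + 1).toNat (List.replicate (cols + 1).toNat (2 : Int)), 0, 0) := by
    calc _ = u.toList.foldl (fun st ch => (pvBits (pvInt32 ch)).foldl (pvStepB rows cols) st)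
               (List.replicate (rows + 1).toNat (List.replicate (cols + 1).toNat (2 : Int)), 0, 0) := by
            apply PySem.List.foldl_congr_mem
            intro st ch hch
            rw [hbody (pvInt32 ch) st]
            obtain ⟨hb0, hb32⟩ := pv_val_bound u rows cols hpre ch hch
            rw [pv_masks_eq_bits _ hb0 hb32]
      _ = _ := pv_foldl_foldl_flatMap _ _ _ _
  rw [hflat]
  by_cases hrows : 0 ≤ rows
  · by_cases hcols : 0 ≤ cols
    · -- main case
      rw [pv_grid0]
      have h00 : ((0 : Nat) : Int) = 0 := rfl
      have hmain := pv_B_main rows cols hrows hcols (pvStream u) [] 0 0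
        (by omega) (by simp) (by omega)
      rw [h00] at hmain
      rw [hmain]
      have hnum : ((rows + 1) * (cols + 1)).toNat = (rows + 1).toNat * (cols + 1).toNat := by
        obtain ⟨a, ha⟩ := Int.eq_ofNat_of_zero_le (show (0 : Int) ≤ rows + 1 by omega)
        obtain ⟨b, hb⟩ := Int.eq_ofNat_of_zero_le (show (0 : Int) ≤ cols + 1 by omega)
        rw [ha, hb, ← Nat.cast_mul, Int.toNat_natCast, Int.toNat_natCast, Int.toNat_natCast]
      rw [hnum]
      simp
    · -- cols + 1 ≤ 0 : every row is empty, the cursor never moves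
      have hguard : ¬ ((0 : Int) ≤ rows ∧ (0 : Int) ≤ cols) := by
        intro ⟨_, h2⟩
        omega
      rw [pv_B_fixed rows cols _ _ _ _ hguard]
      have hWf : (cols + 1).toNat = 0 := by omega
      rw [hWf]
      apply List.ext_getElem
      · simp [pvMkGrid]
      · intro i h1 h2
        simp [pvMkGrid]
  · -- rows + 1 ≤ 0 : the grid is empty
    have hguard : ¬ ((0 : Int) ≤ rows ∧ (0 : Int) ≤ cols) := by
      intro ⟨h1, _⟩
      omega
    rw [pv_B_fixed rows cols _ _ _ _ hguard]
    have hRf : (rows + 1).toNat = 0 := by omega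
    rw [hRf]
    simp [pvMkGrid]

-- ===== VERDICT (by name: the statement is the Claim_ definition above) =====
theorem decode_parity_py_spec : Claim_equal_decode_parity_py := by
  intro u rows cols _hdom hpre
  unfold Spec_decode_parity_py
  rw [pv_A_eq, pv_B_eq u rows cols hpre]
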